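-- pv_equiv track=rewrite | github.com/ZvikaZ/Milon-HaReaya | parser/parse.py | merge_paras
-- ===== SOURCE A (Python) =====
-- def merge_paras(paras):
--     merged_paras = [paras[0]]
--
--     for kind, value in paras[1:]:
--         prev_kind, prev_value = merged_paras[-1]
--
--         if prev_kind == kind:
--             merged_paras[-1] = (kind, prev_value + value)
--         elif value:
--             merged_paras.append((kind, value))
--
--     return merged_paras
-- ===== SOURCE B (Python) =====
-- def merge_paras(paras):
--     head = paras[0]
--     groups = _merge_runs([p for p in paras[1:] if p[1]])
--     if groups and groups[0][0] == head[0]: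
--         return [(head[0], head[1] + groups[0][1])] + groups[1:]
--     return [head] + groups
--
--
-- def _merge_runs(items):
--     # Divide and conquer: merge each half's runs, then join at the boundary.
--     if len(items) <= 1:
--         return list(items)
--     mid = len(items) // 2
--     left = _merge_runs(items[:mid])
--     right = _merge_runs(items[mid:])
--     if left and right and left[-1][0] == right[0][0]:
--         return left[:-1] + [(left[-1][0], left[-1][1] + right[0][1])] + right[1:]
--     return left + right
-- ===== Notes on version B (the rewrite author's own statement) =====
-- stated objective: alternative
-- what changed: Replaces A's single forward loop that mutates the last element of the growing result by a recursive divide-and-conquer: filter empty-value items after the head, recursively merge runs in each half and join halves at their boundary, then attach the head group.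
import Mathlib
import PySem

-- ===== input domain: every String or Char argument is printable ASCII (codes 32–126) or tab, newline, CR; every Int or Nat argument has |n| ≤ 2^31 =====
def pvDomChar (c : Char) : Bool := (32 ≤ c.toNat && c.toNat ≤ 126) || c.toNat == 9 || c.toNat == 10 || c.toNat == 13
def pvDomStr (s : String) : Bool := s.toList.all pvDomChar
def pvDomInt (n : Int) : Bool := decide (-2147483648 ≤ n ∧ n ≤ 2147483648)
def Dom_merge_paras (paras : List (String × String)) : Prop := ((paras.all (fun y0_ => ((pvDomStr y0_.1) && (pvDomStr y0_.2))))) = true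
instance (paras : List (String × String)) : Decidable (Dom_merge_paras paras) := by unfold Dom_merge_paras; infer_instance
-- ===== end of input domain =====

-- B replaces A's mutate-last-element loop by a divide-and-conquer run merge (alternative decomposition); A raises IndexError on [] (excluded by Pre_).


-- ===== PORT A =====
-- A's loop body: read merged[-1], either merge into it, append a non-empty item, or skip.
def mergeStepA (acc : List (String × String)) (kv : String × String) : List (String × String) :=
  let prev := acc.getLastD ("", "")
  if prev.1 == kv.1 then acc.dropLast ++ [(kv.1, prev.2 ++ kv.2)]
  else if kv.2 == "" then acc
  else acc ++ [(kv.1, kv.2)]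

def merge_paras (paras : List (String × String)) : List (String × String) :=
  match paras with
  | [] => []   -- Python raises IndexError on paras[0]; excluded by Pre_
  | p :: rest => rest.foldl mergeStepA [p]

-- ===== PORT B =====
-- Source B's boundary join of two already-merged halves.
def joinHalves (L R : List (String × String)) : List (String × String) :=
  match L.getLast?, R with
  | some (k1, v1), (k2, v2) :: t =>
    if k1 == k2 then L.dropLast ++ (k1, v1 ++ v2) :: t else L ++ R
  | _, _ => L ++ R

-- Source B's _merge_runs: divide and conquer on the list of non-empty items.
def mergeRuns (items : List (String × String)) : List (String × String) :=
  if items.length ≤ 1 then items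
  else
    joinHalves (mergeRuns (items.take (items.length / 2)))
               (mergeRuns (items.drop (items.length / 2)))
termination_by items.length
decreasing_by
  · simp only [List.length_take]; omega
  · simp only [List.length_drop]; omega

def merge_paras_alt (paras : List (String × String)) : List (String × String) :=
  match paras with
  | [] => []   -- Python raises IndexError on paras[0]; excluded by Pre_
  | p :: rest =>
    match mergeRuns (rest.filter (fun q => !(q.2 == ""))) with
    | (k2, v2) :: t => if k2 == p.1 then (p.1, p.2 ++ v2) :: t else p :: (k2, v2) :: t
    | [] => [p]

-- ===== PRECONDITION & SPEC =====
-- Pre_ excludes only the empty list, on which Python A (and B) raise IndexError at paras[0].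
def Pre_merge_paras (paras : List (String × String)) : Prop := paras ≠ []
instance (paras : List (String × String)) : Decidable (Pre_merge_paras paras) := by unfold Pre_merge_paras; infer_instance
def pvWitness_merge_paras : (List (String × String)) := [("a", "x"), ("a", "y"), ("b", "")]

def Spec_merge_paras (paras : List (String × String)) (out : List (String × String)) : Prop := out = merge_paras_alt paras
instance (paras : List (String × String)) (out : List (String × String)) : Decidable (Spec_merge_paras paras out) := by unfold Spec_merge_paras; infer_instance

-- ===== CLAIM (what is proved, stated in full; the proofs are below) =====
def Claim_equal_merge_paras : Prop := ∀ (paras : List (String × String)), Dom_merge_paras paras → Pre_merge_paras paras → Spec_merge_paras paras (merge_paras paras)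

-- ===== LEMMAS AND PROOFS =====

-- canonical form of a merged run: group consecutive equal kinds starting from run (k, v)
def groupRun (k v : String) : List (String × String) → List (String × String)
  | [] => [(k, v)]
  | (k2, v2) :: t => if k == k2 then groupRun k (v ++ v2) t else (k, v) :: groupRun k2 v2 t

-- left-to-right grouping of a whole list
def grouped : List (String × String) → List (String × String)
  | [] => []
  | (k, v) :: t => groupRun k v t

-- merging one run (k, v) into the front of an already-grouped list
def headMerge (k v : String) : List (String × String) → List (String × String)
  | [] => [(k, v)]
  | (k2, v2) :: t => if k2 == k then (k, v ++ v2) :: t else (k, v) :: (k2, v2) :: t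

theorem foldA_eq_groupRun (l : List (String × String)) :
    ∀ (done : List (String × String)) (k v : String),
    l.foldl mergeStepA (done ++ [(k, v)]) =
      done ++ groupRun k v (l.filter (fun q => !(q.2 == ""))) := by
  induction l with
  | nil => intro done k v; simp [groupRun]
  | cons h t ih =>
    intro done k v
    obtain ⟨k2, v2⟩ := h
    by_cases hk : k = k2
    · subst hk
      by_cases hv : v2 = ""
      · subst hv
        simp [mergeStepA, List.filter, ih]
      · have hv' : (v2 == "") = false := by simp [hv]
        simp [mergeStepA, List.filter, hv', groupRun, ih]
    · have hk' : (k == k2) = false := by simp [hk]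
      by_cases hv : v2 = ""
      · subst hv
        simp [mergeStepA, hk', List.filter, ih]
      · have := ih (done ++ [(k, v)]) k2 v2
        simp only [List.append_assoc] at this
        have hv' : (v2 == "") = false := by simp [hv]
        simp only [List.singleton_append] at this
        simp [mergeStepA, hk', List.filter, hv', groupRun, this]

theorem gr_head (t : List (String × String)) :
    ∀ (k v : String), ∃ w rest, groupRun k v t = (k, w) :: rest := by
  induction t with
  | nil => intro k v; exact ⟨v, [], rfl⟩
  | cons h t ih =>
    intro k v
    obtain ⟨k2, v2⟩ := h
    by_cases hk : k = k2
    · subst hk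
      obtain ⟨w, rest, hw⟩ := ih k (v ++ v2)
      exact ⟨w, rest, by simp [groupRun, hw]⟩
    · have hk' : (k == k2) = false := by simp [hk]
      exact ⟨v, groupRun k2 v2 t, by simp [groupRun, hk']⟩

theorem headMerge_headMerge (k v v2 : String) (m : List (String × String)) :
    headMerge k v (headMerge k v2 m) = headMerge k (v ++ v2) m := by
  match m with
  | [] => simp [headMerge]
  | (k3, v3) :: t =>
    by_cases hk : k3 = k
    · subst hk
      simp [headMerge, String.append_assoc]
    · have hk' : (k3 == k) = false := by simp [hk]
      simp [headMerge, hk']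

theorem gr_headMerge (l : List (String × String)) :
    ∀ (k v : String), groupRun k v l = headMerge k v (grouped l) := by
  induction l with
  | nil => intro k v; simp [groupRun, grouped, headMerge]
  | cons h t ih =>
    intro k v
    obtain ⟨k2, v2⟩ := h
    by_cases hk : k = k2
    · subst hk
      simp only [grouped, groupRun, beq_self_eq_true, if_true]
      rw [ih, ih, headMerge_headMerge]
    · have hk' : (k == k2) = false := by simp [hk]
      show (if (k == k2) = true then groupRun k (v ++ v2) t else (k, v) :: groupRun k2 v2 t)
            = headMerge k v (groupRun k2 v2 t)
      obtain ⟨w, rest, hw⟩ := gr_head t k2 v2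
      have hk'' : (k2 == k) = false := by simp [Ne.symm hk]
      simp [hk', hw, headMerge, hk'']

theorem joinHalves_single (k v : String) (m : List (String × String)) :
    joinHalves [(k, v)] m = headMerge k v m := by
  match m with
  | [] => simp [joinHalves, headMerge]
  | (k2, v2) :: t =>
    by_cases hk : k = k2
    · subst hk; simp [joinHalves, headMerge]
    · have h1 : (k == k2) = false := by simp [hk]
      have h2 : (k2 == k) = false := by simp [Ne.symm hk]
      simp [joinHalves, headMerge, h1, h2]

theorem joinHalves_cons (k v : String) (L R : List (String × String)) (hL : L ≠ []) :
    joinHalves ((k, v) :: L) R = (k, v) :: joinHalves L R := by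
  obtain ⟨q, L', hq⟩ := List.exists_cons_of_ne_nil hL
  subst hq
  match hlast : (q :: L').getLast?, R with
  | some (k1, v1), (k2, v2) :: t =>
    have hlast' : ((k, v) :: q :: L').getLast? = some (k1, v1) := by
      rw [List.getLast?_cons_cons] at *; exact hlast
    by_cases hk : k1 = k2
    · subst hk
      simp [joinHalves, hlast, hlast', List.dropLast]
    · have hk' : (k1 == k2) = false := by simp [hk]
      simp [joinHalves, hlast, hlast', hk']
  | some (k1, v1), [] =>
    have hlast' : ((k, v) :: q :: L').getLast? = some (k1, v1) := by
      rw [List.getLast?_cons_cons] at *; exact hlast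
    simp [joinHalves, hlast, hlast']
  | none, _ => simp at hlast

theorem gr_append (a : List (String × String)) :
    ∀ (b : List (String × String)) (k v : String),
    groupRun k v (a ++ b) = joinHalves (groupRun k v a) (grouped b) := by
  induction a with
  | nil =>
    intro b k v
    rw [List.nil_append,
      show groupRun k v ([] : List (String × String)) = [(k, v)] from rfl,
      joinHalves_single, gr_headMerge]
  | cons h a' ih =>
    intro b k v
    obtain ⟨k2, v2⟩ := h
    by_cases hk : k = k2
    · subst hk
      simp only [List.cons_append, groupRun, beq_self_eq_true, if_true]
      exact ih b k (v ++ v2)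
    · have hk' : (k == k2) = false := by simp [hk]
      -- groupRun always returns a nonempty list, so the cons commutes with joinHalves
      obtain ⟨w, rest, hw⟩ := gr_head a' k2 v2
      simp only [List.cons_append, groupRun, hk', Bool.false_eq_true, if_false]
      rw [joinHalves_cons _ _ _ _ (by simp [hw]), ih]

theorem grouped_append (a b : List (String × String)) :
    grouped (a ++ b) = joinHalves (grouped a) (grouped b) := by
  match a with
  | [] => simp [grouped, joinHalves]
  | (k, v) :: a' =>
    show groupRun k v (a' ++ b) = joinHalves (groupRun k v a') (grouped b)
    exact gr_append a' b k v

theorem mergeRuns_eq_grouped (l : List (String × String)) : mergeRuns l = grouped l := by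
  fun_induction mergeRuns l with
  | case1 l h =>
    match l, h with
    | [], _ => simp [grouped]
    | [(k, v)], _ => simp [grouped, groupRun]
  | case2 l h ih1 ih2 =>
    rw [ih1, ih2, ← grouped_append, List.take_append_drop]

-- ===== VERDICT (by name: the statement is the Claim_ definition above) =====
theorem merge_paras_spec : Claim_equal_merge_paras := by
  intro paras _ hpre
  unfold Spec_merge_paras
  match paras with
  | [] => exact absurd rfl hpre
  | p :: rest =>
    obtain ⟨pk, pv⟩ := p
    have hA := foldA_eq_groupRun rest [] pk pv
    simp only [List.nil_append] at hA
    show rest.foldl mergeStepA [(pk, pv)] = _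
    rw [hA, gr_headMerge]
    simp only [merge_paras_alt, mergeRuns_eq_grouped]
    cases hg : grouped (rest.filter (fun q => !(q.2 == ""))) with
    | nil => rfl
    | cons q t => obtain ⟨k2, v2⟩ := q; rfl
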